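-- pv_equiv track=rewrite | github.com/datadoc1/Rad-Report-Consistency | scripts/preprocess_reports.py | preprocess_report
-- ===== SOURCE A (Python) =====
-- def preprocess_report(report_text):
--     lines = report_text.split('\n')
--     relevant_lines = []
--     impression_started = False
--
--     for line in lines:
--         if impression_started:
--             relevant_lines.append(line)
--         elif line.startswith("Great vessels:") or line.startswith("Heart and pericardium:"):
--             relevant_lines.append(line)
--         elif line.startswith("IMPRESSION:"):
--             relevant_lines.append(line)
--             impression_started = True
--
--     return '\n'.join(relevant_lines)
-- ===== SOURCE B (Python) =====
-- def preprocess_report(report_text):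
--     lines = report_text.split('\n')
--     headers = ("Great vessels:", "Heart and pericardium:")
--     for i, line in enumerate(lines):
--         if line.startswith("IMPRESSION:"):
--             kept = [l for l in lines[:i] if l.startswith(headers)] + lines[i:]
--             break
--     else:
--         kept = [l for l in lines if l.startswith(headers)]
--     return '\n'.join(kept)
-- ===== Notes on version B (the rewrite author's own statement) =====
-- stated objective: alternative
-- what changed: Replaces the stateful flag-loop with locate-then-slice: find the first IMPRESSION: line, filter the prefix by the two header prefixes and append the suffix unchanged.
import Mathlib
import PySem

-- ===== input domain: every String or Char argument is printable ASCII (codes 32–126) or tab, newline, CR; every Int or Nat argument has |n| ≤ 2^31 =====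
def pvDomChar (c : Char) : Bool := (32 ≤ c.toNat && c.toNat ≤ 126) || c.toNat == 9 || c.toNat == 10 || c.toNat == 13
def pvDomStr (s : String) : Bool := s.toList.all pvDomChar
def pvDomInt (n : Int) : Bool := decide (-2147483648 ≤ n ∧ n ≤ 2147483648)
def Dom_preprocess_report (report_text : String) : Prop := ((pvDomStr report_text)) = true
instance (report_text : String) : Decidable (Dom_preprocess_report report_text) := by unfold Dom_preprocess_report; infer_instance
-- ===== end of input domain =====

-- B replaces A's stateful flag-loop by locate-then-slice over the lines (alternative decomposition, same cost).

-- ===== PORT A =====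
-- A's for-loop over (relevant_lines, impression_started), as the obvious structural recursion on the remaining lines.
def pvALoop (lines : List String) (impression_started : Bool) : List String :=
  match lines with
  | [] => []
  | line :: rest =>
    if impression_started then line :: pvALoop rest impression_started
    else if PySem.Str.startswith line "Great vessels:" || PySem.Str.startswith line "Heart and pericardium:" then
      line :: pvALoop rest impression_started
    else if PySem.Str.startswith line "IMPRESSION:" then
      line :: pvALoop rest true
    else pvALoop rest impression_started

def preprocess_report (report_text : String) : String :=
  PySem.Str.join "\n" (pvALoop (((PySem.Chars.splitOn report_text.toList ['\n']).map String.ofList)) false)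

-- ===== PORT B =====
def pvIsImp (line : String) : Bool := PySem.Str.startswith line "IMPRESSION:"
def pvIsHdr (line : String) : Bool :=
  PySem.Str.startswith line "Great vessels:" || PySem.Str.startswith line "Heart and pericardium:"

def pvBCombine (lines : List String) : List String :=
  match lines.findIdx? pvIsImp with
  | some i => (lines.take i).filter pvIsHdr ++ lines.drop i
  | none => lines.filter pvIsHdr

def preprocess_report_alt (report_text : String) : String :=
  PySem.Str.join "\n" (pvBCombine (((PySem.Chars.splitOn report_text.toList ['\n']).map String.ofList)))

-- ===== PRECONDITION & SPEC =====
def Spec_preprocess_report (report_text : String) (out : String) : Prop := out = preprocess_report_alt report_text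
instance (report_text : String) (out : String) : Decidable (Spec_preprocess_report report_text out) := by unfold Spec_preprocess_report; infer_instance

-- ===== CLAIM (what is proved, stated in full; the proofs are below) =====
def Claim_equal_preprocess_report : Prop := ∀ (report_text : String), Dom_preprocess_report report_text → Spec_preprocess_report report_text (preprocess_report report_text)

-- ===== LEMMAS AND PROOFS =====

-- a line starting with one of the two headers cannot also start with "IMPRESSION:"
theorem pvHdr_not_imp (l : String) (h : pvIsHdr l = true) : pvIsImp l = false := by
  by_contra hne
  have himp : pvIsImp l = true := by revert hne; cases pvIsImp l <;> simp
  unfold pvIsHdr at h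
  unfold pvIsImp at himp
  simp only [PySem.Str.startswith_eq, Bool.or_eq_true] at h himp
  rw [PySem.Chars.startswith_iff] at himp
  rcases h with h | h <;> rw [PySem.Chars.startswith_iff] at h <;>
    rcases List.prefix_or_prefix_of_prefix h himp with hp | hp <;> revert hp <;> decide

theorem pvALoop_true (lines : List String) : pvALoop lines true = lines := by
  induction lines with
  | nil => rfl
  | cons l rest ih => simp [pvALoop, ih]

theorem pvALoop_eq_pvBCombine (lines : List String) : pvALoop lines false = pvBCombine lines := by
  induction lines with
  | nil => rfl
  | cons l rest ih =>
    by_cases himp : pvIsImp l = true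
    · have hhdr : pvIsHdr l = false := by
        by_contra h
        have : pvIsHdr l = true := by revert h; cases pvIsHdr l <;> simp
        simp [pvHdr_not_imp l this] at himp
      have hhdr' : (PySem.Str.startswith l "Great vessels:" || PySem.Str.startswith l "Heart and pericardium:") = false := hhdr
      have himp' : PySem.Str.startswith l "IMPRESSION:" = true := himp
      unfold pvALoop pvBCombine
      rw [List.findIdx?_cons]
      simp only [himp, hhdr', Bool.false_eq_true, if_false, himp', if_true,
        pvALoop_true, List.take_zero, List.filter_nil, List.nil_append, List.drop_zero]
    · have himp' : pvIsImp l = false := by revert himp; cases pvIsImp l <;> simp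
      unfold pvALoop pvBCombine
      rw [List.findIdx?_cons]
      simp only [himp']
      by_cases hhdr : pvIsHdr l = true
      · have e1 : (PySem.Str.startswith l "Great vessels:" || PySem.Str.startswith l "Heart and pericardium:") = true := hhdr
        rw [e1]
        simp only [if_true]
        rw [ih]
        unfold pvBCombine
        cases hfi : rest.findIdx? pvIsImp with
        | none => simp [hhdr]
        | some i => simp [hhdr]
      · have hhdr' : pvIsHdr l = false := by revert hhdr; cases pvIsHdr l <;> simp
        have e1 : (PySem.Str.startswith l "Great vessels:" || PySem.Str.startswith l "Heart and pericardium:") = false := hhdr'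
        rw [e1]
        have e2 : PySem.Str.startswith l "IMPRESSION:" = false := himp'
        simp only [Bool.false_eq_true, if_false, e2]
        rw [ih]
        unfold pvBCombine
        cases hfi : rest.findIdx? pvIsImp with
        | none => simp [hhdr']
        | some i => simp [hhdr']

-- ===== VERDICT (by name: the statement is the Claim_ definition above) =====
theorem preprocess_report_spec : Claim_equal_preprocess_report := by
  intro report_text _
  unfold Spec_preprocess_report preprocess_report preprocess_report_alt
  rw [pvALoop_eq_pvBCombine]
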